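-- pv_equiv track=rewrite | github.com/apatel183/CSC-241-Introduction-to-Computer-Science-I | Labs/Lab 8/lab8.py | findMinRow
-- ===== SOURCE A (Python) =====
-- def findMinRow(num):
--     lst=[]
--     if len(num)<1:
--         return -1
--     for i in num:
--         lst.append(sum(i))
--     new=min(lst)
--     return lst.index(new)
-- ===== SOURCE B (Python) =====
-- def findMinRow(num):
--     best_i = -1
--     best_s = None
--     for i, row in enumerate(num):
--         s = sum(row)
--         if best_s is None or s < best_s:
--             best_s = s
--             best_i = i
--     return best_i
-- ===== Notes on version B (the rewrite author's own statement) =====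
-- stated objective: simpler
-- what changed: Single pass tracking the best (sum, index) seen so far with strict '<' for first-occurrence ties, instead of building the full list of sums, then min(), then list.index().
import Mathlib
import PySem

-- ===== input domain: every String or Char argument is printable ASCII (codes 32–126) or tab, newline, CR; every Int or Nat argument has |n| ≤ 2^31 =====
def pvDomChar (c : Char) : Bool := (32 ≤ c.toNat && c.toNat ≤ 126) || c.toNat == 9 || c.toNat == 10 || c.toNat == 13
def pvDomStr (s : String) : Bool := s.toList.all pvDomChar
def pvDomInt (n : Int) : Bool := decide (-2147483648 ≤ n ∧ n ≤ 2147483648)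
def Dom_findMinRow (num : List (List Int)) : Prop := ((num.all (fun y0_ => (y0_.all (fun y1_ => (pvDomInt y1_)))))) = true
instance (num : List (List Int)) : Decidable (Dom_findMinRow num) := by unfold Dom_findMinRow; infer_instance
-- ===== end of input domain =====

-- B replaces A's three passes (build sums list, min(), list.index()) by one pass
-- tracking the best (sum, index) with strict '<' (first minimum wins); simpler, O(1) extra space.


-- ===== PORT A =====
def findMinRow (num : List (List Int)) : Int :=
  if num.length < 1 then -1
  else
    let lst := num.foldl (fun acc i => acc ++ [i.sum]) []
    match PySem.List.min? lst (fun x => x) with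
    | none => -1          -- unreachable: lst is nonempty here (Python min would raise on [])
    | some new =>
      match PySem.List.index? lst new with
      | none => -1        -- unreachable: new ∈ lst
      | some k => (k : Int)

-- ===== PORT B =====
-- the enumerate loop of Source B: state = (index of current row, best index, best sum so far)
def altGo (rows : List (List Int)) (i : Int) (bestI : Int) (bestS : Option Int) : Int :=
  match rows with
  | [] => bestI
  | r :: rs =>
    let s := r.sum
    match bestS with
    | none => altGo rs (i + 1) i (some s)
    | some b => if s < b then altGo rs (i + 1) i (some s) else altGo rs (i + 1) bestI (some b)

def findMinRow_alt (num : List (List Int)) : Int :=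
  altGo num 0 (-1) none

-- ===== PRECONDITION & SPEC =====
def Spec_findMinRow (num : List (List Int)) (out : Int) : Prop := out = findMinRow_alt num
instance (num : List (List Int)) (out : Int) : Decidable (Spec_findMinRow num out) := by unfold Spec_findMinRow; infer_instance

-- ===== CLAIM (what is proved, stated in full; the proofs are below) =====
def Claim_equal_findMinRow : Prop := ∀ (num : List (List Int)), Dom_findMinRow num → Spec_findMinRow num (findMinRow num)

-- ===== LEMMAS AND PROOFS =====

-- first minimum of a list together with its index
def minIdx : List Int → Option (Int × Nat)
  | [] => none
  | x :: xs =>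
    match minIdx xs with
    | none => some (x, 0)
    | some (m, j) => if m < x then some (m, j + 1) else some (x, 0)

theorem minIdx_cons (x : Int) (xs : List Int) :
    minIdx (x :: xs) =
      match minIdx xs with
      | none => some (x, 0)
      | some (m, j) => if m < x then some (m, j + 1) else some (x, 0) := rfl

theorem foldl_eq_map_sum (num : List (List Int)) (acc : List Int) :
    num.foldl (fun acc i => acc ++ [i.sum]) acc = acc ++ num.map List.sum := by
  induction num generalizing acc with
  | nil => simp
  | cons r rs ih => simp [List.foldl, ih]

theorem foldl_min_pull (t : List Int) (a b : Int) :
    t.foldl min (min a b) = min a (t.foldl min b) := by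
  induction t generalizing b with
  | nil => simp
  | cons c t ih =>
    simp only [List.foldl]
    rw [min_assoc, ih]

theorem minIdx_fst (t : List Int) (x : Int) :
    (minIdx (x :: t)).map Prod.fst = some (t.foldl min x) := by
  induction t generalizing x with
  | nil => simp [minIdx]
  | cons y t' ih =>
    have ih' := ih y
    cases h : minIdx (y :: t') with
    | none => rw [h] at ih'; simp at ih'
    | some p =>
      obtain ⟨m, j⟩ := p
      rw [h] at ih'
      simp only [Option.map_some, Option.some.injEq] at ih'
      rw [minIdx_cons, h]
      have hr : (y :: t').foldl min x = min x (t'.foldl min y) := by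
        simp only [List.foldl]; exact foldl_min_pull t' x y
      rw [hr, ← ih']
      by_cases hm : m < x
      · simp [hm, min_eq_right (le_of_lt hm)]
      · simp [hm, min_eq_left (le_of_not_gt hm)]

theorem minIdx_index (xs : List Int) (m : Int) (j : Nat) (h : minIdx xs = some (m, j)) :
    PySem.List.index? xs m = some j := by
  induction xs generalizing m j with
  | nil => simp [minIdx] at h
  | cons x t ih =>
    rw [minIdx_cons] at h
    cases ht : minIdx t with
    | none =>
      rw [ht] at h
      simp only [Option.some.injEq, Prod.mk.injEq] at h
      obtain ⟨hm, hj⟩ := h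
      subst hm; subst hj
      exact PySem.List.index?_cons_self x t
    | some p =>
      obtain ⟨m', j'⟩ := p
      rw [ht] at h
      dsimp only at h
      by_cases hlt : m' < x
      · rw [if_pos hlt] at h
        simp only [Option.some.injEq, Prod.mk.injEq] at h
        obtain ⟨hm, hj⟩ := h
        subst hm; subst hj
        have hne : x ≠ m' := by omega
        rw [PySem.List.index?_cons_of_ne t hne, ih m' j' ht]
        rfl
      · rw [if_neg hlt] at h
        simp only [Option.some.injEq, Prod.mk.injEq] at h
        obtain ⟨hm, hj⟩ := h
        subst hm; subst hj
        exact PySem.List.index?_cons_self x t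

-- A on a nonempty list returns the index of the first minimum of the sums
theorem findMinRow_cons (r : List Int) (rs : List (List Int)) :
    findMinRow (r :: rs) =
      match minIdx ((r :: rs).map List.sum) with
      | none => -1
      | some (_, j) => (j : Int) := by
  simp only [findMinRow, List.length_cons]
  rw [if_neg (by omega)]
  rw [foldl_eq_map_sum]
  simp only [List.nil_append, List.map_cons]
  have hfst := minIdx_fst (rs.map List.sum) r.sum
  cases h : minIdx (r.sum :: rs.map List.sum) with
  | none => rw [h] at hfst; simp at hfst
  | some p =>
    obtain ⟨m, j⟩ := p
    rw [h] at hfst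
    simp only [Option.map_some, Option.some.injEq] at hfst
    rw [PySem.List.min?_id_cons, ← hfst]
    dsimp only
    rw [minIdx_index _ m j h]

-- the loop of B, characterised in terms of minIdx
theorem altGo_some (rs : List (List Int)) (i bi b : Int) :
    altGo rs i bi (some b) =
      match minIdx (rs.map List.sum) with
      | none => bi
      | some (m, j) => if m < b then i + (j : Int) else bi := by
  induction rs generalizing i bi b with
  | nil => simp [altGo, minIdx]
  | cons r rs ih =>
    simp only [altGo, List.map_cons, minIdx_cons]
    cases h : minIdx (rs.map List.sum) with
    | none =>
      simp only [ih, h]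
      by_cases hsb : r.sum < b
      · simp only [if_pos hsb]; ring
      · simp only [if_neg hsb]
    | some p =>
      obtain ⟨m, j⟩ := p
      simp only [ih, h]
      by_cases hms : m < r.sum
      · by_cases hsb : r.sum < b
        · have hmb : m < b := lt_trans hms hsb
          simp only [if_pos hsb, if_pos hms, if_pos hmb]
          push_cast; ring
        · simp only [if_neg hsb, if_pos hms]
          by_cases hmb : m < b
          · simp only [if_pos hmb]; push_cast; ring
          · simp only [if_neg hmb]
      · have hmb_of : r.sum ≤ m := le_of_not_gt hms
        by_cases hsb : r.sum < b
        · simp only [if_pos hsb, if_neg hms]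
          norm_num
        · have hmb : ¬ m < b := by omega
          simp only [if_neg hsb, if_neg hms, if_neg hmb]

theorem A_eq_B (num : List (List Int)) : findMinRow num = findMinRow_alt num := by
  cases num with
  | nil => simp [findMinRow, findMinRow_alt, altGo]
  | cons r rs =>
    rw [findMinRow_cons]
    simp only [findMinRow_alt, altGo, altGo_some]
    simp only [List.map_cons, minIdx_cons]
    cases h : minIdx (rs.map List.sum) with
    | none => simp
    | some p =>
      obtain ⟨m, j⟩ := p
      by_cases hms : m < r.sum
      · simp only [if_pos hms]; push_cast; ring
      · simp only [if_neg hms]; norm_num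

-- ===== VERDICT (by name: the statement is the Claim_ definition above) =====
theorem findMinRow_spec : Claim_equal_findMinRow := by
  intro num _
  unfold Spec_findMinRow
  exact A_eq_B num
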